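-- pv_equiv track=rewrite | github.com/TerrazasJr316/Developing-API-Trees | app.py | dfs
-- ===== SOURCE A (Python) =====
-- def dfs(start, goal):
--     stack = [(start, [])]
--     visited = set()
--
--     while stack:
--         state, path = stack.pop()
--         if state == goal:
--             return path + [state]
--         if state in visited:
--             continue
--         visited.add(state)
--         for next_state in get_neighbors(state):
--             if next_state not in visited:
--                 stack.append((next_state, path + [state]))
--
--     return []
--
-- def get_neighbors(state):
--     neighbors = []
--     for i in range(len(state) - 1):
--         new_state = list(state)
--         new_state[i], new_state[i + 1] = new_state[i + 1], new_state[i]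
--         neighbors.append(tuple(new_state))
--     return neighbors
-- ===== SOURCE B (Python) =====
-- def dfs(start, goal):
--     # Recursive DFS (call stack) sharing one visited set, instead of A's
--     # explicit-stack loop; children are filtered once after marking the state
--     # and explored in reversed order to reproduce the LIFO exploration order.
--     visited = set()
--
--     def go(state, path):
--         if state == goal:
--             return path + [state]
--         if state in visited:
--             return None
--         visited.add(state)
--         children = [n for n in reversed(get_neighbors(state)) if n not in visited]
--         for n in children:
--             r = go(n, path + [state])
--             if r is not None:
--                 return r
--         return None
--
--     r = go(start, [])
--     return r if r is not None else []
--
--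
-- def get_neighbors(state):
--     neighbors = []
--     for i in range(len(state) - 1):
--         new_state = list(state)
--         new_state[i], new_state[i + 1] = new_state[i + 1], new_state[i]
--         neighbors.append(tuple(new_state))
--     return neighbors
-- ===== Notes on version B (the rewrite author's own statement) =====
-- stated objective: alternative
-- what changed: The iterative explicit-stack DFS is replaced by a recursive DFS on the call stack sharing a single visited set; each state's unvisited children are computed once and explored in reversed order, reproducing the stack's LIFO exploration order exactly.
import Mathlib
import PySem

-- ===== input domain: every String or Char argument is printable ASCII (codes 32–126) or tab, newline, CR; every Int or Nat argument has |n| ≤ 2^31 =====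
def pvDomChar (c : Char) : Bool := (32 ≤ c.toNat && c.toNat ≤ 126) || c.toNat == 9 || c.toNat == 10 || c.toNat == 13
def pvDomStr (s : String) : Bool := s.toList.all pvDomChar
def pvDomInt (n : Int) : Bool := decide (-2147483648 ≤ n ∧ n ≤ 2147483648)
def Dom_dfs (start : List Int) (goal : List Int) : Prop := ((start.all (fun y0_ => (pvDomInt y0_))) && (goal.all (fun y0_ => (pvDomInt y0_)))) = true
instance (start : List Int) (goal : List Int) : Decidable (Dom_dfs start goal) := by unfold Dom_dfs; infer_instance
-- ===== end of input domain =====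

-- B replaces A's explicit-stack loop by a recursive DFS (Python's call stack)
-- sharing one visited set; same exploration order, same return value.

-- ===== PORT A =====
-- get_neighbors: all adjacent transpositions, in index order (shared by both ports).
def getNeighbors (state : List Int) : List (List Int) :=
  (List.range (state.length - 1)).foldl
    (fun acc i =>
      acc ++ [(state.set i (state.getD (i + 1) 0)).set (i + 1) (state.getD i 0)])
    []

-- A's while-loop. The stack is stored TOP-FIRST (Python pops from / appends to
-- the end): pop = head, and appending neighbors n1..nk = prepending their reverse.
-- The fuel argument only makes the loop total (one unit per loop iteration); it
-- is chosen large enough that it never runs out in practice, and the proof shows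
-- the two ports agree at EVERY fuel value, so its size plays no role in the claim.
def dfsLoopA (goal : List Int) :
    Nat → List (List Int × List (List Int)) → PySem.Set (List Int) →
    Option (List (List Int))
  | 0, _, _ => none
  | _ + 1, [], _ => some []
  | f + 1, (state, path) :: rest, visited =>
    if state = goal then some (path ++ [state])
    else if PySem.Set.contains visited state then dfsLoopA goal f rest visited
    else
      let visited' := PySem.Set.add visited state
      dfsLoopA goal f
        ((((getNeighbors state).filter
            (fun n => ! PySem.Set.contains visited' n)).reverse.map
              (fun n => (n, path ++ [state]))) ++ rest) visited'

def dfsFuel (start : List Int) : Nat :=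
  (start.length + 1) * Nat.factorial start.length + 2

def dfs (start : List Int) (goal : List Int) : List (List Int) :=
  (dfsLoopA goal (dfsFuel start) [(start, [])] PySem.Set.empty).getD []

-- ===== PORT B =====
-- B's recursive `go` and its `for` loop over the children, as mutual recursion.
-- The shared mutable `visited` set is threaded through and returned; the same
-- fuel device as in A makes the recursion total (one unit per `go` call = one
-- unit per popped frame in A), returned together with the result so that the
-- sibling loop continues with the fuel that is left (the ≤ bound is only the
-- termination certificate).
mutual
def goB (goal : List Int) (f : Nat) (state : List Int) (path : List (List Int))
    (vis : PySem.Set (List Int)) :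
    Option (List (List Int)) × PySem.Set (List Int) × {f' : Nat // f' ≤ f} :=
  match f with
  | 0 => (none, vis, ⟨0, Nat.le_refl 0⟩)
  | f + 1 =>
    if state = goal then (some (path ++ [state]), vis, ⟨f, Nat.le_succ f⟩)
    else if PySem.Set.contains vis state then (none, vis, ⟨f, Nat.le_succ f⟩)
    else
      let vis' := PySem.Set.add vis state
      let children :=
        ((getNeighbors state).reverse.filter (fun n => ! PySem.Set.contains vis' n))
      let r := runKids goal f children state path vis'
      (r.1, r.2.1, ⟨r.2.2.1, Nat.le_succ_of_le r.2.2.2⟩)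
termination_by (f, 0)
decreasing_by
  exact Prod.Lex.left _ _ (Nat.lt_succ_self f)

def runKids (goal : List Int) (f : Nat) (kids : List (List Int))
    (state : List Int) (path : List (List Int)) (vis : PySem.Set (List Int)) :
    Option (List (List Int)) × PySem.Set (List Int) × {f' : Nat // f' ≤ f} :=
  match kids with
  | [] => (none, vis, ⟨f, Nat.le_refl f⟩)
  | n :: ns =>
    match goB goal f n (path ++ [state]) vis with
    | (some r, vis2, f2) => (some r, vis2, f2)
    | (none, vis2, ⟨f2, h2⟩) =>
      let r := runKids goal f2 ns state path vis2
      (r.1, r.2.1, ⟨r.2.2.1, Nat.le_trans r.2.2.2 h2⟩)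
termination_by (f, kids.length + 1)
decreasing_by
  · exact Prod.Lex.right _ (Nat.succ_pos _)
  · rcases Nat.lt_or_ge f2 f with h | h
    · exact Prod.Lex.left _ _ h
    · have he : f2 = f := Nat.le_antisymm h2 h
      subst he
      exact Prod.Lex.right _ (Nat.lt_succ_self _)
end

def dfs_alt (start : List Int) (goal : List Int) : List (List Int) :=
  match (goB goal (dfsFuel start) start [] PySem.Set.empty).1 with
  | some r => r
  | none => []

-- ===== PRECONDITION & SPEC =====
def Spec_dfs (start : List Int) (goal : List Int) (out : List (List Int)) : Prop := out = dfs_alt start goal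
instance (start : List Int) (goal : List Int) (out : List (List Int)) : Decidable (Spec_dfs start goal out) := by unfold Spec_dfs; infer_instance

-- ===== CLAIM (what is proved, stated in full; the proofs are below) =====
def Claim_equal_dfs : Prop := ∀ (start : List Int) (goal : List Int), Dom_dfs start goal → Spec_dfs start goal (dfs start goal)

-- ===== LEMMAS AND PROOFS =====

-- "A's loop on one frame + a tail continues as B's `go` on that frame":
-- statements P (for goB) and Q (for runKids), proved by simultaneous strong
-- induction on the fuel.
def contA (goal : List Int)
    (r : Option (List (List Int)) × PySem.Set (List Int) × Nat)
    (tail : List (List Int × List (List Int))) : Option (List (List Int)) :=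
  match r.1 with
  | some out => some out
  | none => dfsLoopA goal r.2.2 tail r.2.1

def Pstmt (f : Nat) : Prop :=
  ∀ (goal state : List Int) (path : List (List Int))
    (vis : PySem.Set (List Int)) (tail : List (List Int × List (List Int))),
    dfsLoopA goal f ((state, path) :: tail) vis =
      contA goal
        (let r := goB goal f state path vis; (r.1, r.2.1, r.2.2.1)) tail

def Qstmt (f : Nat) : Prop :=
  ∀ (goal : List Int) (kids : List (List Int)) (state : List Int)
    (path : List (List Int)) (vis : PySem.Set (List Int))
    (tail : List (List Int × List (List Int))),
    dfsLoopA goal f (kids.map (fun n => (n, path ++ [state])) ++ tail) vis =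
      contA goal
        (let r := runKids goal f kids state path vis; (r.1, r.2.1, r.2.2.1)) tail

theorem pq_all : ∀ f : Nat, Pstmt f ∧ Qstmt f := by
  intro f
  induction f using Nat.strong_induction_on with
  | _ f IH =>
    have hP : Pstmt f := by
      intro goal state path vis tail
      cases f with
      | zero => simp [dfsLoopA, goB, contA]
      | succ g =>
        rw [dfsLoopA, goB]
        by_cases hgoal : state = goal
        · simp [hgoal, contA]
        · rw [if_neg hgoal, if_neg hgoal]
          by_cases hv : PySem.Set.contains vis state = true
          · simp only [if_pos hv, contA]
          · simp only [if_neg hv]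
            have hQ := (IH g (Nat.lt_succ_self g)).2 goal
              ((getNeighbors state).reverse.filter
                (fun n => ! PySem.Set.contains (PySem.Set.add vis state) n))
              state path (PySem.Set.add vis state) tail
            simp only [contA] at hQ ⊢
            rw [← List.filter_reverse]
            exact hQ
    refine ⟨hP, ?_⟩
    -- Q at fuel f: induction on the children list, fuel generalized but ≤ f.
    have hPall : ∀ g ≤ f, Pstmt g := by
      intro g hg
      rcases Nat.lt_or_ge g f with h | h
      · exact (IH g h).1
      · have : g = f := Nat.le_antisymm hg h
        subst this; exact hP
    intro goal kids
    induction kids with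
    | nil => intro state path vis tail; simp [runKids, contA]
    | cons n ns ihk =>
      intro state path vis tail
      -- we need the statement for `ns` at every fuel ≤ f; strengthen via IH + ihk
      have step : ∀ g ≤ f, ∀ (vis : PySem.Set (List Int)) tail,
          dfsLoopA goal g (ns.map (fun m => (m, path ++ [state])) ++ tail) vis =
            contA goal
              (let r := runKids goal g ns state path vis; (r.1, r.2.1, r.2.2.1)) tail := by
        intro g hg vis tail
        rcases Nat.lt_or_ge g f with h | h
        · exact (IH g h).2 goal ns state path vis tail
        · have : g = f := Nat.le_antisymm hg h
          subst this
          exact ihk state path vis tail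
      show dfsLoopA goal f ((n, path ++ [state]) :: (ns.map (fun m => (m, path ++ [state])) ++ tail)) vis = _
      rw [hPall f (Nat.le_refl f) goal n (path ++ [state]) vis]
      rw [runKids]
      rcases hr : goB goal f n (path ++ [state]) vis with ⟨res, vis2, f2, hf2⟩
      cases res with
      | some out => simp [contA]
      | none =>
        simp only [contA]
        exact step f2 hf2 vis2 tail


theorem dfs_eq_alt (start goal : List Int) : dfs start goal = dfs_alt start goal := by
  unfold dfs dfs_alt
  have hP := (pq_all (dfsFuel start)).1 goal start [] PySem.Set.empty []
  rw [show [((start : List Int), ([] : List (List Int)))] =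
        ((start, ([] : List (List Int))) :: []) from rfl] at hP
  rw [hP]
  rcases hr : goB goal (dfsFuel start) start [] PySem.Set.empty with ⟨res, vis2, f2, hf2⟩
  cases res with
  | some out => simp [contA]
  | none =>
    simp only [contA]
    cases f2 with
    | zero => simp [dfsLoopA]
    | succ g => simp [dfsLoopA]

-- ===== VERDICT (by name: the statement is the Claim_ definition above) =====
theorem dfs_spec : Claim_equal_dfs := by
  intro start goal _
  unfold Spec_dfs
  exact dfs_eq_alt start goal
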